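-- pv_equiv track=rewrite | github.com/jeroen85/OpenQuatt | scripts/simulate_heating_curve_history.py | _count_topology_entries
-- ===== SOURCE A (Python) =====
-- from typing import Dict, Iterable, List, Optional, Sequence, Tuple
--
-- def _count_topology_entries(levels: Sequence[Tuple[int, int]], topology: str) -> int:
--     count = 0
--     previous = "off"
--     for hp1, hp2 in levels:
--         current = _topology_for_levels(hp1, hp2)
--         if current == topology and previous != topology:
--             count += 1
--         previous = current
--     return count
--
-- def _topology_for_levels(hp1: int, hp2: int) -> str:
--     active = int(hp1 > 0) + int(hp2 > 0)
--     if active == 0: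
--         return "off"
--     if active == 1:
--         return "single"
--     return "duo"
-- ===== SOURCE B (Python) =====
-- def _topology_for_levels(hp1: int, hp2: int) -> str:
--     active = int(hp1 > 0) + int(hp2 > 0)
--     if active == 0:
--         return "off"
--     if active == 1:
--         return "single"
--     return "duo"
--
-- def _count_topology_entries(levels, topology):
--     # Run-length view: an "entry" into `topology` is exactly one maximal run of
--     # that state in the "off"-prefixed state sequence (the sentinel run itself
--     # is not an entry). Collapse consecutive duplicates, then count runs.
--     runs = ["off"]
--     for h1, h2 in levels:
--         s = _topology_for_levels(h1, h2)
--         if s != runs[-1]: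
--             runs.append(s)
--     return runs.count(topology) - (1 if topology == "off" else 0)
-- ===== Notes on version B (the rewrite author's own statement) =====
-- stated objective: alternative
-- what changed: Replaced A's single accumulator loop threading (count, previous) with a run-length decomposition: collapse the off-prefixed state sequence into maximal runs by deduplicating consecutive equal states, then count the runs equal to the target state, subtracting the sentinel run when the target is 'off'.
import Mathlib
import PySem

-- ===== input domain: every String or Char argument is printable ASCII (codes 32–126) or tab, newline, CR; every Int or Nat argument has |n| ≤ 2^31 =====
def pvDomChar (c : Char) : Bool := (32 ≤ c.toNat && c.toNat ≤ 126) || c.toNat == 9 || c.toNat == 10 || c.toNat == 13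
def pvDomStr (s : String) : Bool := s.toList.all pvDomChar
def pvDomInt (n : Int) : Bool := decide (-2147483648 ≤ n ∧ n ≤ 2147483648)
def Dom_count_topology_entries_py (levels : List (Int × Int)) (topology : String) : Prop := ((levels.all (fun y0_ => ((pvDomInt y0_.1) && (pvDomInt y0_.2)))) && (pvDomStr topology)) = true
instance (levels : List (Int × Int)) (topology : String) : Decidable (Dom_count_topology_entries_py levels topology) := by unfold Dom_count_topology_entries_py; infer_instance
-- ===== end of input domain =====

-- B replaces A's accumulator loop (count, previous) by a run-length decomposition:
-- collapse the off-prefixed state sequence into maximal runs, then count runs equal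
-- to the target (subtracting the sentinel run when the target is "off").

-- ===== PORT A =====
def topology_for_levels_py (hp1 : Int) (hp2 : Int) : String :=
  let active : Int := (if hp1 > 0 then 1 else 0) + (if hp2 > 0 then 1 else 0)
  if active = 0 then "off"
  else if active = 1 then "single"
  else "duo"

def count_topology_entries_py (levels : List (Int × Int)) (topology : String) : Int :=
  (levels.foldl
    (fun (st : Int × String) p =>
      (if topology_for_levels_py p.1 p.2 = topology ∧ st.2 ≠ topology then st.1 + 1 else st.1,
       topology_for_levels_py p.1 p.2))
    (0, "off")).1

-- ===== PORT B =====
def count_topology_entries_py_alt (levels : List (Int × Int)) (topology : String) : Int :=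
  (((levels.foldl
    (fun (runs : List String) p =>
      if topology_for_levels_py p.1 p.2 ≠ runs.getLast! then
        runs ++ [topology_for_levels_py p.1 p.2] else runs)
    ["off"]).count topology : Int)) - (if topology = "off" then 1 else 0)

-- ===== PRECONDITION & SPEC =====
def Spec_count_topology_entries_py (levels : List (Int × Int)) (topology : String) (out : Int) : Prop := out = count_topology_entries_py_alt levels topology
instance (levels : List (Int × Int)) (topology : String) (out : Int) : Decidable (Spec_count_topology_entries_py levels topology out) := by unfold Spec_count_topology_entries_py; infer_instance

-- ===== CLAIM (what is proved, stated in full; the proofs are below) =====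
def Claim_equal_count_topology_entries_py : Prop := ∀ (levels : List (Int × Int)) (topology : String), Dom_count_topology_entries_py levels topology → Spec_count_topology_entries_py levels topology (count_topology_entries_py levels topology)

-- ===== LEMMAS AND PROOFS =====
theorem getLast!_concat_str (l : List String) (a : String) : (l ++ [a]).getLast! = a := by
  induction l with
  | nil => rfl
  | cons b tl ih =>
      cases tl with
      | nil => rfl
      | cons c tl' => simpa [List.getLast!] using ih

theorem fold_inv (topology : String) :
    ∀ (levels : List (Int × Int)) (c : Int) (pre : List String) (prev : String),
      (levels.foldl
        (fun (st : Int × String) p =>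
          (if topology_for_levels_py p.1 p.2 = topology ∧ st.2 ≠ topology then st.1 + 1 else st.1,
           topology_for_levels_py p.1 p.2))
        (c, prev)).1
      = c + ((((levels.foldl
            (fun (runs : List String) p =>
              if topology_for_levels_py p.1 p.2 ≠ runs.getLast! then
                runs ++ [topology_for_levels_py p.1 p.2] else runs)
            (pre ++ [prev])).count topology : Int))
          - (((pre ++ [prev]).count topology : Int))) := by
  intro levels
  induction levels with
  | nil => intro c pre prev; simp
  | cons a tl ih =>
      intro c pre prev
      simp only [List.foldl_cons, getLast!_concat_str]
      by_cases hs : topology_for_levels_py a.1 a.2 = prev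
      · have hcond : ¬ (topology_for_levels_py a.1 a.2 = topology ∧ prev ≠ topology) := by
          rintro ⟨h1, h2⟩; exact h2 (hs ▸ h1)
        simp only [hs, ne_eq, not_true_eq_false, ite_false]
        simpa [hcond] using ih c pre prev
      · have hcount : ((pre ++ [prev]) ++ [topology_for_levels_py a.1 a.2]).count topology
            = (pre ++ [prev]).count topology
              + (if topology_for_levels_py a.1 a.2 = topology then 1 else 0) := by
          rw [List.count_append]
          by_cases ht : topology_for_levels_py a.1 a.2 = topology
          · rw [if_pos ht, ht]; simp
          · rw [if_neg ht]
            have h1 : List.count topology [topology_for_levels_py a.1 a.2] = 0 := by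
              rw [List.count_eq_zero]
              simp only [List.mem_singleton]
              exact fun h => ht h.symm
            omega
        have hstep := ih
          (if topology_for_levels_py a.1 a.2 = topology ∧ prev ≠ topology then c + 1 else c)
          (pre ++ [prev]) (topology_for_levels_py a.1 a.2)
        rw [if_pos (show topology_for_levels_py a.1 a.2 ≠ prev from hs)]
        rw [hstep]
        by_cases ht : topology_for_levels_py a.1 a.2 = topology
        · have hprev : prev ≠ topology := fun h => hs (ht.trans h.symm)
          rw [if_pos ⟨ht, hprev⟩]
          rw [if_pos ht] at hcount
          omega
        · rw [if_neg (by rintro ⟨h1, _⟩; exact ht h1)]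
          rw [if_neg ht] at hcount
          omega

-- ===== VERDICT (by name: the statement is the Claim_ definition above) =====
theorem count_topology_entries_py_spec : Claim_equal_count_topology_entries_py := by
  intro levels topology _
  unfold Spec_count_topology_entries_py count_topology_entries_py count_topology_entries_py_alt
  have h := fold_inv topology levels 0 [] "off"
  rw [List.nil_append] at h
  rw [h]
  by_cases ho : topology = "off"
  · subst ho; simp
  · have h1 : List.count topology ["off"] = 0 := by
      rw [List.count_eq_zero]
      simp only [List.mem_singleton]
      exact ho
    rw [if_neg ho, h1]
    omega
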